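/- GENERATED by farm/mkstatement.py from design/units.tsv (unit `weighted_sum`) and the Specs of Toy/Spec/*.lean — do not edit.
   THE STATEMENT of the proof unit `weighted_sum`: the function `weighted_sum` (30 instructions) satisfies its contract,
   given the contracts of its callees. What the names mean: ProgX/Base/Spec/Basic.lean. The theorem to prove:
   `theorem weighted_sum_ok : Toy.Spec.weighted_sum.Statement`. -/
import Toy.Code
import Toy.Dec.All
import Toy.Labels
import Toy.Spec.Toy
namespace Toy.Spec.weighted_sum
open X86 X86.User Asan

/-- The statement of unit `weighted_sum`. -/
def Statement : Prop :=
  ∀ (Lay : Layout) (_hLay : Lay.hi = 0x1000000) (μ : Microarch) (_hμ : UserX.MicroOK μ) (u₀ : State)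
    (_hcode : HasCodeNat Lay u₀ Toy.L.weighted_sum.entry Toy.Code.code_weighted_sum.nat Toy.L.weighted_sum.size)
    (_h_asan_load1_noabort : Asan.SmallCheck Lay μ ProgX.Base.WayInv (ProgX.Base.CodeOK u₀) [.rax, .rdx] 1 ProgX.Base.L.__asan_load1_noabort.entry),
    ∀ (others : List Obj) (frames : List (Nat × FrameLayout)), Calls Lay μ ProgX.Base.WayInv (ProgX.Base.conv u₀) Toy.L.weighted_sum.entry (Toy.Spec.weighted_sum.spec others frames)

end Toy.Spec.weighted_sum
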